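-- pv_equiv track=rewrite | github.com/ROCm/Tensile | Tensile/SolutionStructs.py | swap
-- ===== SOURCE A (Python) =====
-- def swap(targetStr, replStr1, replStr2):
--   tmp = '$'
--   assert(tmp not in targetStr)
--   for (char1,char2) in zip(replStr1,replStr2):
--     if char1==',':
--       continue
--     targetStr = targetStr.replace(char1, tmp).replace(char2, char1).replace(tmp, char2)
--   return targetStr
-- ===== SOURCE B (Python) =====
-- def swap(targetStr, replStr1, replStr2):
--   # Compose the per-character effect of every swap step into one table,
--   # then translate the string in a single pass.
--   assert('$' not in targetStr)
--   pairs = [(c1, c2) for (c1, c2) in zip(replStr1, replStr2) if c1 != ',']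
--   def image(x):
--     for (c1, c2) in pairs:
--       if x == c1:
--         x = '$'
--       if x == c2:
--         x = c1
--       if x == '$':
--         x = c2
--     return x
--   table = {c: image(c) for c in set(targetStr)}
--   return ''.join(table[c] for c in targetStr)
-- ===== Notes on version B (the rewrite author's own statement) =====
-- stated objective: faster
-- what changed: Instead of rewriting the whole string with three str.replace passes per swap pair, B composes the per-character effect of all swap steps into one translation table over the distinct characters and maps the string once.
import Mathlib
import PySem

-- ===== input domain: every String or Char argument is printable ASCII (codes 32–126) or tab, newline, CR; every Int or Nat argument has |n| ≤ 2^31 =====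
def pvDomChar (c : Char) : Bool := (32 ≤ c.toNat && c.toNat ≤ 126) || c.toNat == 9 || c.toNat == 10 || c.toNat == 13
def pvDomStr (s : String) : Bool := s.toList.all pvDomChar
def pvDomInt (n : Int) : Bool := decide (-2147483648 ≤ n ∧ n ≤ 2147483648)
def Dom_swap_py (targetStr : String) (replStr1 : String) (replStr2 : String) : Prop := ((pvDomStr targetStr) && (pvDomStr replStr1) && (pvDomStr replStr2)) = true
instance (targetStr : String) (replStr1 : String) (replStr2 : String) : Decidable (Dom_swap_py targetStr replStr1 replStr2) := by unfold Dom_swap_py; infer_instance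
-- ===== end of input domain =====

-- B replaces A's three whole-string replace passes per swap pair with one composed
-- per-character translation table applied in a single pass (objective: faster).

-- ===== PORT A =====
def swap_py (targetStr : String) (replStr1 : String) (replStr2 : String) : String :=
  -- the assert('$' not in targetStr) raises outside Pre_swap_py; nothing is computed there
  (List.zip replStr1.toList replStr2.toList).foldl
    (fun s p =>
      if p.1 = ',' then s
      else PySem.Str.replace
             (PySem.Str.replace (PySem.Str.replace s (String.ofList [p.1]) "$") (String.ofList [p.2]) (String.ofList [p.1]))
             "$" (String.ofList [p.2]))
    targetStr

-- ===== PORT B =====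
def pvStep (x : Char) (p : Char × Char) : Char :=
  let a := if x = p.1 then '$' else x
  let b := if a = p.2 then p.1 else a
  if b = '$' then p.2 else b

def swap_py_alt (targetStr : String) (replStr1 : String) (replStr2 : String) : String :=
  let pairs := (List.zip replStr1.toList replStr2.toList).filter (fun p => !(p.1 == ','))
  let image := fun (x : Char) => pairs.foldl pvStep x
  let table : PySem.Dict Char Char :=
    (PySem.Set.ofList targetStr.toList).foldl (fun d c => d.insert c (image c)) PySem.Dict.empty
  -- table[c] always hits (c ∈ set(targetStr)); the getD default is never used
  String.ofList (targetStr.toList.map (fun c => table.getD c c))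

-- ===== PRECONDITION & SPEC =====
-- Pre_ excludes exactly the inputs where A's assert fails ('$' in targetStr): A raises AssertionError there.
def Pre_swap_py (targetStr : String) (replStr1 : String) (replStr2 : String) : Prop :=
  PySem.Str.isIn "$" targetStr = false
instance (targetStr : String) (replStr1 : String) (replStr2 : String) : Decidable (Pre_swap_py targetStr replStr1 replStr2) := by unfold Pre_swap_py; infer_instance
def pvWitness_swap_py : String × String × String := ("abcabc", "ab,c", "badc")
def Spec_swap_py (targetStr : String) (replStr1 : String) (replStr2 : String) (out : String) : Prop := out = swap_py_alt targetStr replStr1 replStr2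
instance (targetStr : String) (replStr1 : String) (replStr2 : String) (out : String) : Decidable (Spec_swap_py targetStr replStr1 replStr2 out) := by unfold Spec_swap_py; infer_instance

-- ===== CLAIM (what is proved, stated in full; the proofs are below) =====
def Claim_equal_swap_py : Prop := ∀ (targetStr : String) (replStr1 : String) (replStr2 : String), Dom_swap_py targetStr replStr1 replStr2 → Pre_swap_py targetStr replStr1 replStr2 → Spec_swap_py targetStr replStr1 replStr2 (swap_py targetStr replStr1 replStr2)

-- ===== LEMMAS AND PROOFS =====

-- single-char str.replace is a pointwise map
theorem replace_go_single (a b : Char) : ∀ (l acc : List Char),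
    PySem.Chars.replace.go [a] [b] l.length l acc
      = acc.reverse ++ l.map (fun x => if x = a then b else x) := by
  intro l
  induction l with
  | nil => intro acc; simp [PySem.Chars.replace.go]
  | cons c t ih =>
    intro acc
    simp only [List.length_cons, PySem.Chars.replace.go, List.map_cons]
    by_cases h : c = a
    · subst h
      simp [List.isPrefixOf, ih, List.append_assoc]
    · have hp : [a].isPrefixOf (c :: t) = false := by
        simp [List.isPrefixOf]; exact fun hca => h hca.symm
      simp [hp, ih, List.append_assoc, h]

theorem replace_single (s : List Char) (a b : Char) :
    PySem.Chars.replace s [a] [b] = s.map (fun x => if x = a then b else x) := by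
  simp [PySem.Chars.replace, replace_go_single]

theorem str_replace_single (s : String) (a b : Char) :
    PySem.Str.replace s (String.ofList [a]) (String.ofList [b])
      = String.ofList (s.toList.map (fun x => if x = a then b else x)) := by
  apply String.toList_injective
  simp [PySem.Str.toList_replace, String.toList_ofList, replace_single]

-- one A-iteration (three replaces) = mapping pvStep over the string
theorem a_step_eq_map (s : String) (p : Char × Char) :
    PySem.Str.replace
        (PySem.Str.replace (PySem.Str.replace s (String.ofList [p.1]) "$") (String.ofList [p.2]) (String.ofList [p.1]))
        "$" (String.ofList [p.2])
      = String.ofList (s.toList.map (fun x => pvStep x p)) := by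
  have h1 : ("$" : String) = String.ofList ['$'] := rfl
  rw [h1, str_replace_single, str_replace_single, str_replace_single]
  simp only [String.toList_ofList, List.map_map]
  rfl

-- A's whole fold = one map of the composed per-character function
theorem a_fold_eq_map (ps : List (Char × Char)) : ∀ (s : String),
    ps.foldl
      (fun s p =>
        if p.1 = ',' then s
        else PySem.Str.replace
              (PySem.Str.replace (PySem.Str.replace s (String.ofList [p.1]) "$") (String.ofList [p.2]) (String.ofList [p.1]))
              "$" (String.ofList [p.2])) s
    = String.ofList (s.toList.map (fun x => (ps.filter (fun p => !(p.1 == ','))).foldl pvStep x)) := by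
  induction ps with
  | nil =>
    intro s
    apply String.toList_injective
    simp
  | cons p t ih =>
    intro s
    by_cases hc : p.1 = ','
    · simp only [List.foldl_cons, hc, if_pos, List.filter_cons, ih]
      simp
    · simp only [List.foldl_cons, if_neg hc]
      rw [ih, a_step_eq_map]
      have hb : (p.1 == ',') = false := by simpa using hc
      simp only [List.filter_cons, hb, Bool.not_false, if_true, List.foldl_cons,
        String.toList_ofList, List.map_map]
      rfl

-- lookup in the table built by the insert loop
theorem getD_foldl_insert_fn (f : Char → Char) : ∀ (l : List Char) (d : PySem.Dict Char Char) (x : Char),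
    (l.foldl (fun d c => d.insert c (f c)) d).getD x x
      = if x ∈ l then f x else d.getD x x := by
  intro l
  induction l with
  | nil => intro d x; simp
  | cons c t ih =>
    intro d x
    simp only [List.foldl_cons, ih, List.mem_cons]
    by_cases hm : x ∈ t
    · simp [hm]
    · simp only [hm, if_false, or_false, PySem.Dict.getD_insert]
      by_cases hx : x = c <;> simp [hx]

-- ===== VERDICT (by name: the statement is the Claim_ definition above) =====
theorem swap_py_spec : Claim_equal_swap_py := by
  intro t r1 r2 _ _
  show swap_py t r1 r2 = swap_py_alt t r1 r2
  unfold swap_py swap_py_alt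
  rw [a_fold_eq_map]
  congr 1
  apply List.map_congr_left
  intro c hc
  rw [getD_foldl_insert_fn]
  simp [PySem.Set.mem_ofList, hc]
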